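-- pv_equiv track=rewrite | github.com/mattsavin/aoc-2023 | day1/day1.py | part_two
-- ===== SOURCE A (Python) =====
-- def part_two(data):
--     # Numbers can only be a part of another with the first or last letters
--     translation = {'zero': 'z0o', 'one': 'o1e', 'two': 't2o', 'three': 't3e',
--                'four': 'f4r', 'five': 'f5e', 'six': 's6x', 'seven': 's7n',
--                'eight': 'e8t', 'nine': 'n9e'}
--
--     total = 0
--     for line in data:
--         for key, value in translation.items():
--             line = line.replace(key, value)
--         numbers = [j for j in line if j.isdigit()]
--         total  += int(numbers[0] + numbers[-1])
--     return total
-- ===== SOURCE B (Python) =====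
-- WORDS = ['zero', 'one', 'two', 'three', 'four', 'five', 'six', 'seven', 'eight', 'nine']
--
--
-- def part_two(data):
--     total = 0
--     for line in data:
--         nums = []
--         suf = line
--         while suf:
--             if suf[0].isdigit():
--                 nums.append(int(suf[0]))
--             else:
--                 for d, w in enumerate(WORDS):
--                     if suf.startswith(w):
--                         nums.append(d)
--             suf = suf[1:]
--         total += 10 * nums[0] + nums[-1]
--     return total
-- ===== Notes on version B (the rewrite author's own statement) =====
-- stated objective: alternative
-- what changed: B replaces A's ten sequential full-string replace passes (plus a digit-filter over the rewritten line) by a single left-to-right scan of each original line that collects a digit for each digit character or spelled-out word starting at each position, then combines first and last digit arithmetically (10*first+last) instead of via string concatenation and int().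
import Mathlib
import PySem

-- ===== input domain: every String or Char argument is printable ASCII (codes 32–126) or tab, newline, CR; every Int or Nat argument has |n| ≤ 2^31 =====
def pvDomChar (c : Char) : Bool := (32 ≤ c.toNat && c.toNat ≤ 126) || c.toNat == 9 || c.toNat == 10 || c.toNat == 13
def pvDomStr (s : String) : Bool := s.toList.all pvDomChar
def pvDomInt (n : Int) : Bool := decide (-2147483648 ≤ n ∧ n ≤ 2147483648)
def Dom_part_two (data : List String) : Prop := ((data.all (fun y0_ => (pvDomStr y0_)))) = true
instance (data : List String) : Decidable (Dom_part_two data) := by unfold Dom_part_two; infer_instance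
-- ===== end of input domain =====

-- B re-implements the sum with a single per-position scan of each line (digit char or
-- spelled-out word starting at that position) instead of A's ten sequential
-- string-replacement passes; same value wherever A returns (objective: alternative).

-- ===== PORT A =====
def translation : List (String × String) :=
  [("zero", "z0o"), ("one", "o1e"), ("two", "t2o"), ("three", "t3e"), ("four", "f4r"),
   ("five", "f5e"), ("six", "s6x"), ("seven", "s7n"), ("eight", "e8t"), ("nine", "n9e")]

def part_two (data : List String) : Int :=
  data.foldl (fun total line =>
    let line2 := translation.foldl (fun l kv => PySem.Str.replace l kv.1 kv.2) line
    -- [j for j in line if j.isdigit()] — j is a single char; str.isdigit on one ASCII char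
    let numbers : List Char := line2.toList.filter (fun j => PySem.Chars.isdigit j)
    total + (match PySem.List.pyGet? numbers 0, PySem.List.pyGet? numbers (-1) with
      | some a, some b => (PySem.Int.ofChars? [a, b]).getD 0   -- int(numbers[0] + numbers[-1]); always two digit chars here
      | _, _ => 0)) 0   -- numbers == []: Python raises IndexError; excluded by Pre_part_two
  -- (`0` branches are dead code under Pre_part_two)

-- ===== PORT B =====
def digitWords : List String :=
  ["zero", "one", "two", "three", "four", "five", "six", "seven", "eight", "nine"]

-- for d, w in enumerate(WORDS): if suf.startswith(w): nums.append(d)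
def scanHits (suf : List Char) : List Int :=
  (PySem.List.enumerate (digitWords.map String.toList) 0).foldl
    (fun acc dw => if PySem.Chars.startswith suf dw.2 then acc ++ [dw.1] else acc) []

-- the while-loop over suffixes; int(suf[0]) on an ASCII digit char is its value
def scanLine : List Char → List Int
  | [] => []
  | c :: t => (if PySem.Chars.isdigit c then [(c.toNat : Int) - 48] else scanHits (c :: t)) ++ scanLine t

def part_two_alt (data : List String) : Int :=
  data.foldl (fun total line =>
    let nums := scanLine line.toList
    total + (match PySem.List.pyGet? nums 0, PySem.List.pyGet? nums (-1) with
      | some a, some b => 10 * a + b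
      | none, _ => 0
      | some _, none => 0)) 0   -- nums == []: Python raises IndexError; excluded by Pre_part_two

-- ===== PRECONDITION & SPEC =====
-- Pre_ excludes exactly the inputs with a line containing neither an ASCII digit nor a
-- spelled-out digit word: there numbers[0] raises IndexError in A (and nums[0] in B).
def Pre_part_two (data : List String) : Prop :=
  (data.all (fun line => line.toList.any PySem.Chars.isdigit ||
    digitWords.any (fun w => PySem.Chars.isIn w.toList line.toList))) = true
instance (data : List String) : Decidable (Pre_part_two data) := by unfold Pre_part_two; infer_instance

def pvWitness_part_two : List String := ["twone", "3abc8def", "seven"]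

def Spec_part_two (data : List String) (out : Int) : Prop := out = part_two_alt data
instance (data : List String) (out : Int) : Decidable (Spec_part_two data out) := by unfold Spec_part_two; infer_instance

-- ===== CLAIM (what is proved, stated in full; the proofs are below) =====
def Claim_equal_part_two : Prop := ∀ (data : List String), Dom_part_two data → Pre_part_two data → Spec_part_two data (part_two data)

-- ===== LEMMAS AND PROOFS =====

-- ---- proof-side machinery: a one-pass simultaneous replacer simRep, shown equal to
-- ---- A's chain of replaces on one side and to B's scan on the other.

def entDigit (e : Int × List Char) : Char := Char.ofNat (48 + e.1.toNat)
def entPat (e : Int × List Char) : List Char := [e.2.headD ' ', entDigit e, e.2.getLastD ' ']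

def ents : List (Int × List Char) := PySem.List.enumerate (digitWords.map String.toList) 0

def findEnt (es : List (Int × List Char)) (s : List Char) : Option (Int × List Char) :=
  es.find? (fun e => decide (2 ≤ e.2.length) && e.2.isPrefixOf s)

theorem findEnt_some {es : List (Int × List Char)} {s : List Char} {e : Int × List Char}
    (h : findEnt es s = some e) : e ∈ es ∧ 2 ≤ e.2.length ∧ e.2 <+: s := by
  have h1 := List.find?_some h
  have h2 := List.mem_of_find?_eq_some h
  simp only [Bool.and_eq_true, decide_eq_true_eq, List.isPrefixOf_iff_prefix] at h1
  exact ⟨h2, h1.1, h1.2⟩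

def simRep (es : List (Int × List Char)) (s : List Char) : List Char :=
  match hf : findEnt es s with
  | some e => e.2.headD ' ' :: entDigit e :: simRep es (e.2.getLastD ' ' :: s.drop e.2.length)
  | none =>
    match s with
    | [] => []
    | c :: t => c :: simRep es t
termination_by s.length
decreasing_by
  · have h := findEnt_some hf
    have := h.2.2.length_le
    simp only [List.length_cons, List.length_drop]
    omega
  · simp

theorem simRep_some {es : List (Int × List Char)} {s : List Char} {e : Int × List Char}
    (h : findEnt es s = some e) :
    simRep es s = e.2.headD ' ' :: entDigit e :: simRep es (e.2.getLastD ' ' :: s.drop e.2.length) := by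
  rw [simRep]
  split
  · rename_i e' heq; rw [h] at heq; cases heq; rfl
  · rename_i heq; rw [h] at heq; cases heq

theorem simRep_none_nil {es : List (Int × List Char)}
    (h : findEnt es [] = none) : simRep es [] = [] := by
  rw [simRep]
  split
  · rename_i e' heq; rw [h] at heq; cases heq
  · rfl

theorem simRep_none_cons {es : List (Int × List Char)} {c : Char} {t : List Char}
    (h : findEnt es (c :: t) = none) : simRep es (c :: t) = c :: simRep es t := by
  rw [simRep]
  split
  · rename_i e' heq; rw [h] at heq; cases heq
  · rfl

def rep (old new s : List Char) : List Char :=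
  match old, s with
  | [], s => s
  | _ :: _, [] => []
  | o :: old', c :: t =>
    if (o :: old').isPrefixOf (c :: t) then new ++ rep (o :: old') new (t.drop old'.length)
    else c :: rep (o :: old') new t
termination_by s.length
decreasing_by
  · simp only [List.length_cons, List.length_drop]; omega
  · simp

abbrev GoodEnt (e : Int × List Char) : Prop :=
  3 ≤ e.2.length ∧ (e.2.all (fun c => !PySem.Chars.isdigit c)) = true ∧
  PySem.Chars.isdigit (entDigit e) = true ∧ e.2.headD ' ' ≠ e.2.getLastD ' ' ∧
  ((entDigit e).toNat : Int) - 48 = e.1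

abbrev GoodList (es : List (Int × List Char)) : Prop :=
  (∀ e ∈ es, GoodEnt e) ∧
  (∀ e1 ∈ es, ∀ e2 ∈ es, ∀ p ∈ List.range e1.2.length, 1 ≤ p → p + 2 ≤ e1.2.length →
      ¬ (e1.2.drop p <+: e2.2) ∧ ¬ (e2.2 <+: e1.2.drop p)) ∧
  List.Pairwise (fun a b => a.2.take 2 ≠ b.2.take 2) es

set_option maxRecDepth 100000 in
theorem good_ents : GoodList ents :=
  ⟨by decide, by decide, by decide⟩

theorem goodList_append_left {es : List (Int × List Char)} {e : Int × List Char}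
    (h : GoodList (es ++ [e])) : GoodList es := by
  obtain ⟨h1, h2, h3⟩ := h
  refine ⟨fun x hx => h1 x (by simp [hx]), fun e1 he1 e2 he2 p hp h1p h2p =>
    h2 e1 (by simp [he1]) e2 (by simp [he2]) p hp h1p h2p, (List.pairwise_append.1 h3).1⟩

theorem simRep_nil (s : List Char) : simRep [] s = s := by
  induction s with
  | nil => exact simRep_none_nil rfl
  | cons c t ih => rw [simRep_none_cons rfl, ih]

theorem simRep_cons (es : List (Int × List Char)) (c : Char) (t : List Char) :
    ∃ X, simRep es (c :: t) = c :: X := by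
  cases hf : findEnt es (c :: t) with
  | some e =>
    obtain ⟨-, hlen, hpre⟩ := findEnt_some hf
    obtain ⟨r, hr⟩ := hpre
    cases he : e.2 with
    | nil => rw [he] at hlen; simp at hlen
    | cons x xs =>
      rw [he] at hr
      injection hr with h1 h2
      exact ⟨entDigit e :: simRep es (e.2.getLastD ' ' :: (c :: t).drop e.2.length),
        by rw [simRep_some hf, he]; simp [h1]⟩
  | none => exact ⟨_, simRep_none_cons hf⟩

theorem wordChar_not_digit {es : List (Int × List Char)} (hG : GoodList es)
    {e : Int × List Char} (he : e ∈ es) {c : Char} (hc : c ∈ e.2) :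
    PySem.Chars.isdigit c = false := by
  have h := (hG.1 e he).2.1
  rw [List.all_eq_true] at h
  simpa using h c hc

theorem simRep_take_agree {es : List (Int × List Char)} (hG : GoodList es) :
    ∀ s n, (∀ c ∈ (simRep es s).take n, PySem.Chars.isdigit c = false) →
      (simRep es s).take n = s.take n := by
  have main : ∀ (L : ℕ) (s : List Char), s.length = L →
      ∀ n, (∀ c ∈ (simRep es s).take n, PySem.Chars.isdigit c = false) →
        (simRep es s).take n = s.take n := by
    intro L
    induction L using Nat.strong_induction_on with
    | _ L IH =>
      intro s hL n hdf
      cases hf : findEnt es s with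
      | some e =>
        obtain ⟨hmem, hlen, hpre⟩ := findEnt_some hf
        rw [simRep_some hf] at hdf ⊢
        match n with
        | 0 => simp
        | 1 =>
          obtain ⟨r, hr⟩ := hpre
          cases he : e.2 with
          | nil => rw [he] at hlen; simp at hlen
          | cons x xs =>
            rw [he] at hr
            cases hr
            simp
        | (m+2) =>
          have hd := hdf (entDigit e) (by simp)
          have := (hG.1 e hmem).2.2.1
          rw [this] at hd
          cases hd
      | none =>
        cases s with
        | nil => rw [simRep_none_nil hf]
        | cons c t =>
          rw [simRep_none_cons hf] at hdf ⊢
          match n with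
          | 0 => simp
          | (m+1) =>
            simp only [List.take_succ_cons]
            rw [IH t.length (by rw [List.length_cons] at hL; omega) t rfl m (fun c hc => hdf c (by simp [hc]))]
  exact fun s n h => main s.length s rfl n h

theorem replace_go_eq (old new : List Char) (h : old ≠ []) :
    ∀ fuel (l acc : List Char), l.length ≤ fuel →
      PySem.Chars.replace.go old new fuel l acc = acc.reverse ++ rep old new l := by
  intro fuel
  induction fuel with
  | zero =>
    intro l acc hl
    have : l = [] := by cases l <;> simp_all
    subst this
    obtain ⟨o, old', rfl⟩ : ∃ o old', old = o :: old' := by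
      cases old with
      | nil => exact absurd rfl h
      | cons o old' => exact ⟨o, old', rfl⟩
    simp [PySem.Chars.replace.go, rep]
  | succ fuel ih =>
    intro l acc hl
    obtain ⟨o, old', rfl⟩ : ∃ o old', old = o :: old' := by
      cases old with
      | nil => exact absurd rfl h
      | cons o old' => exact ⟨o, old', rfl⟩
    cases l with
    | nil =>
      rw [PySem.Chars.replace.go, rep] <;> simp
    | cons c t =>
      rw [PySem.Chars.replace.go]
      by_cases hp : (o :: old').isPrefixOf (c :: t)
      · simp only [hp, if_true]
        rw [ih ((c :: t).drop (o :: old').length) (new.reverse ++ acc)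
            (by simp only [List.length_drop]; simp at hl ⊢; omega)]
        rw [rep]
        simp [hp]
      · simp only [hp, if_false, Bool.false_eq_true]
        rw [ih t (c :: acc) (by simp at hl ⊢; omega)]
        rw [rep]
        simp [hp]

theorem replace_eq_rep (old new s : List Char) (h : old ≠ []) :
    PySem.Chars.replace s old new = rep old new s := by
  rw [PySem.Chars.replace]
  have : old.isEmpty = false := by cases old <;> simp_all
  rw [this]
  simpa using replace_go_eq old new h s.length s [] le_rfl

theorem skip_simRep {es : List (Int × List Char)} :
    ∀ u z, (∀ p < u.length, findEnt es (u.drop p ++ z) = none) →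
      simRep es (u ++ z) = u ++ simRep es z := by
  intro u
  induction u with
  | nil => intro z _; simp
  | cons a u' ih =>
    intro z hc
    have h0 : findEnt es (a :: (u' ++ z)) = none := by
      have := hc 0 (by simp)
      simpa using this
    simp only [List.cons_append]
    rw [simRep_none_cons h0, ih z (fun p hp => by
      have := hc (p+1) (by simp; omega)
      simpa using this)]

theorem prefix_append_cases {a b c : List Char} (h : a <+: b ++ c) : a <+: b ∨ b <+: a :=
  List.prefix_or_prefix_of_prefix h (b.prefix_append c)

theorem findEnt_drop_none {all es : List (Int × List Char)} (hG : GoodList all)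
    (hsub : ∀ x ∈ es, x ∈ all) {e : Int × List Char} (he : e ∈ all) (q : ℕ)
    (h1 : 1 ≤ q) (h2 : q + 2 ≤ e.2.length) (r : List Char) :
    findEnt es (e.2.drop q ++ r) = none := by
  cases hfind : findEnt es (e.2.drop q ++ r) with
  | none => rfl
  | some e2 =>
    obtain ⟨hm2, hl2, hp2⟩ := findEnt_some hfind
    have hcross := hG.2.1 e he e2 (hsub e2 hm2) q (List.mem_range.2 (by omega)) h1 h2
    rcases prefix_append_cases hp2 with h | h
    · exact absurd h hcross.2
    · exact absurd h hcross.1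

theorem rep_nilS (o : Char) (old' new : List Char) : rep (o :: old') new [] = [] := by
  rw [rep]

theorem rep_match {o : Char} {old' t : List Char} {c : Char} {new : List Char}
    (h : (o :: old') <+: (c :: t)) :
    rep (o :: old') new (c :: t) = new ++ rep (o :: old') new (t.drop old'.length) := by
  rw [rep]
  simp [List.isPrefixOf_iff_prefix.2 h]

theorem rep_skip {o : Char} {old' t : List Char} {c : Char} {new : List Char}
    (h : ¬ (o :: old') <+: (c :: t)) :
    rep (o :: old') new (c :: t) = c :: rep (o :: old') new t := by
  rw [rep]
  have : (o :: old').isPrefixOf (c :: t) = false := by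
    rw [Bool.eq_false_iff]
    exact fun hq => h (List.isPrefixOf_iff_prefix.1 hq)
  simp [this]

theorem findEnt_append_some {es : List (Int × List Char)} {s : List Char}
    {e' x : Int × List Char} (h : findEnt es s = some e') :
    findEnt (es ++ [x]) s = some e' := by
  unfold findEnt at h ⊢
  rw [List.find?_append, h]
  rfl

theorem findEnt_append_none_some {es : List (Int × List Char)} {s : List Char}
    {e : Int × List Char} (h : findEnt es s = none) (hl : 2 ≤ e.2.length)
    (hp : e.2 <+: s) : findEnt (es ++ [e]) s = some e := by
  unfold findEnt at h ⊢
  rw [List.find?_append, h]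
  simp [List.isPrefixOf_iff_prefix.2 hp, hl]

theorem findEnt_append_none_none {es : List (Int × List Char)} {s : List Char}
    {e : Int × List Char} (h : findEnt es s = none) (hp : ¬ e.2 <+: s) :
    findEnt (es ++ [e]) s = none := by
  unfold findEnt at h ⊢
  rw [List.find?_append, h]
  have : e.2.isPrefixOf s = false := by
    rw [Bool.eq_false_iff]
    exact fun hq => hp (List.isPrefixOf_iff_prefix.1 hq)
  simp [this]

theorem step_simRep {es : List (Int × List Char)} {e : Int × List Char}
    (hG : GoodList (es ++ [e])) :
    ∀ s, rep e.2 (entPat e) (simRep es s) = simRep (es ++ [e]) s := by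
  have hGes := goodList_append_left hG
  have heMem : e ∈ es ++ [e] := by simp
  have hGe := hG.1 e heMem
  have hL3 : 3 ≤ e.2.length := hGe.1
  obtain ⟨o, old', hw⟩ : ∃ o old', e.2 = o :: old' := by
    cases hwc : e.2 with
    | nil => rw [hwc] at hL3; simp at hL3
    | cons a t => exact ⟨a, t, rfl⟩
  have main : ∀ (L : ℕ) (s : List Char), s.length = L →
      rep e.2 (entPat e) (simRep es s) = simRep (es ++ [e]) s := by
    intro L
    induction L using Nat.strong_induction_on with
    | _ L IH =>
      intro s hL
      cases hf : findEnt es s with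
      | some e' =>
        obtain ⟨hmem', hlen', hpre'⟩ := findEnt_some hf
        have hGe' := hG.1 e' (List.mem_append_left _ hmem')
        rw [simRep_some hf]
        have hnp1 : ¬ (o :: old') <+: (e'.2.headD ' ' :: entDigit e' ::
            simRep es (e'.2.getLastD ' ' :: s.drop e'.2.length)) := by
          intro hq
          rw [List.cons_prefix_cons] at hq
          obtain ⟨-, hq2⟩ := hq
          cases hold : old' with
          | nil => rw [hw, hold] at hL3; simp at hL3
          | cons a as =>
            rw [hold, List.cons_prefix_cons] at hq2
            have ha : a ∈ e.2 := by rw [hw, hold]; simp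
            have hnd := wordChar_not_digit hG heMem ha
            rw [hq2.1, hGe'.2.2.1] at hnd
            simp at hnd
        have hnp2 : ¬ (o :: old') <+: (entDigit e' ::
            simRep es (e'.2.getLastD ' ' :: s.drop e'.2.length)) := by
          intro hq
          rw [List.cons_prefix_cons] at hq
          have ho : o ∈ e.2 := by rw [hw]; simp
          have hnd := wordChar_not_digit hG heMem ho
          rw [hq.1, hGe'.2.2.1] at hnd
          simp at hnd
        rw [hw, rep_skip hnp1, rep_skip hnp2, ← hw]
        have hlt : (e'.2.getLastD ' ' :: s.drop e'.2.length).length < L := by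
          have := hpre'.length_le
          simp only [List.length_cons, List.length_drop]
          omega
        rw [IH _ hlt (e'.2.getLastD ' ' :: s.drop e'.2.length) rfl]
        rw [simRep_some (findEnt_append_some hf)]
      | none =>
        by_cases hm : e.2 <+: s
        · obtain ⟨r, hr⟩ := hm
          have hwne : e.2 ≠ [] := by rw [hw]; simp
          obtain ⟨u, lc, hu⟩ : ∃ u lc, e.2 = u ++ [lc] :=
            ⟨e.2.dropLast, e.2.getLast hwne, (List.dropLast_append_getLast hwne).symm⟩
          have hlc : e.2.getLastD ' ' = lc := by rw [hu]; simp
          have hulen : u.length + 1 = e.2.length := by rw [hu]; simp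
          have hs : s = u ++ (lc :: r) := by rw [← hr, hu]; simp
          have hskips : ∀ p < u.length, findEnt es (u.drop p ++ (lc :: r)) = none := by
            intro p hp
            have hdropeq : u.drop p ++ (lc :: r) = e.2.drop p ++ r := by
              rw [hu, List.drop_append_of_le_length (by omega)]
              simp
            rw [hdropeq]
            match p with
            | 0 => simpa [hr] using hf
            | (q+1) =>
              exact findEnt_drop_none hG (fun x hx => List.mem_append_left _ hx) heMem
                (q+1) (by omega) (by omega) r
          obtain ⟨X, hX⟩ := simRep_cons es lc r
          rw [hs] at hf hr ⊢
          rw [skip_simRep u (lc :: r) hskips, hX]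
          have key : u ++ lc :: X = o :: (old' ++ X) := by
            have h1 : u ++ lc :: X = (u ++ [lc]) ++ X := by simp
            rw [h1, ← hu, hw]
            rfl
          rw [key, hw, rep_match (List.cons_prefix_cons.2 ⟨rfl, List.prefix_append old' X⟩),
            show (old' ++ X).drop old'.length = X from List.drop_left]
          rw [simRep_some (findEnt_append_none_some hf (by omega) ⟨r, hr⟩)]
          have hdr : (u ++ lc :: r).drop e.2.length = r := by
            rw [← hr]; exact List.drop_left
          rw [hdr, hlc]
          rw [hs] at hL
          have hIH := IH (lc :: r).length (by
              simp only [List.length_append, List.length_cons] at hL ⊢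
              omega) (lc :: r) rfl
          rw [hX] at hIH
          have holc : o ≠ lc := by
            have hho := hGe.2.2.2.1
            rw [hlc, hw] at hho
            simpa using hho
          have hnl : ¬ (o :: old') <+: (lc :: X) := by
            intro hq
            exact holc (List.cons_prefix_cons.1 hq).1
          rw [hw, rep_skip hnl] at hIH
          rw [← hIH]
          have hhead : e.2.headD ' ' = o := by rw [hw]; rfl
          rw [entPat, hhead, hlc]
          rfl
        · cases s with
          | nil =>
            rw [simRep_none_nil hf, hw, rep_nilS,
              simRep_none_nil (findEnt_append_none_none hf hm)]
          | cons c t =>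
            rw [simRep_none_cons hf]
            have hnp : ¬ (o :: old') <+: (c :: simRep es t) := by
              intro hq
              apply hm
              rw [List.cons_prefix_cons] at hq
              obtain ⟨hq1, hq2⟩ := hq
              obtain ⟨r', hr'⟩ := hq2
              have htake : (simRep es t).take old'.length = old' := by
                rw [← hr', List.take_left]
              have hdf : ∀ ch ∈ (simRep es t).take old'.length,
                  PySem.Chars.isdigit ch = false := by
                rw [htake]
                intro ch hch
                exact wordChar_not_digit hG heMem (by rw [hw]; simp [hch])
              have hagree := simRep_take_agree hGes t old'.length hdf
              rw [htake] at hagree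
              rw [hw, List.cons_prefix_cons]
              exact ⟨hq1, hagree ▸ List.take_prefix _ _⟩
            rw [hw, rep_skip hnp, ← hw]
            rw [IH t.length (by rw [List.length_cons] at hL; omega) t rfl]
            rw [simRep_none_cons (findEnt_append_none_none hf hm)]
  exact fun s => main s.length s rfl

theorem chain_simRep : ∀ (es : List (Int × List Char)), GoodList es →
    ∀ s, es.foldl (fun l e => rep e.2 (entPat e) l) s = simRep es s := by
  intro es
  induction es using List.reverseRecOn with
  | nil => intro _ s; simp [simRep_nil]
  | append_singleton es e ih =>
    intro hG s
    rw [List.foldl_append, List.foldl_cons, List.foldl_nil,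
      ih (goodList_append_left hG) s, step_simRep hG s]



-- B-side generic scan
def hitsG (es : List (Int × List Char)) (suf : List Char) : List Int :=
  es.foldl (fun acc e => if e.2.isPrefixOf suf then acc ++ [e.1] else acc) []

def scanG (es : List (Int × List Char)) : List Char → List Int
  | [] => []
  | c :: t => (if PySem.Chars.isdigit c then [(c.toNat : Int) - 48] else hitsG es (c :: t)) ++ scanG es t

theorem startswith_eq_isPrefixOf (s p : List Char) :
    PySem.Chars.startswith s p = p.isPrefixOf s := by
  rw [Bool.eq_iff_iff, PySem.Chars.startswith_iff, List.isPrefixOf_iff_prefix]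

theorem scanHits_eq (suf : List Char) : scanHits suf = hitsG ents suf := by
  simp only [scanHits, hitsG, ents, startswith_eq_isPrefixOf]

theorem scanLine_eq : ∀ s, scanLine s = scanG ents s := by
  intro s
  induction s with
  | nil => rfl
  | cons c t ih => simp only [scanLine, scanG, scanHits_eq, ih]

theorem hitsG_filter (es : List (Int × List Char)) (s : List Char) :
    hitsG es s = (es.filter (fun e => e.2.isPrefixOf s)).map (·.1) := by
  exact PySem.List.foldl_append_if (fun e => e.2.isPrefixOf s) (·.1) es []

theorem both_prefix_take2 {s w1 w2 : List Char} (h1 : w1 <+: s) (h2 : w2 <+: s)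
    (hl1 : 2 ≤ w1.length) (hl2 : 2 ≤ w2.length) : w1.take 2 = w2.take 2 := by
  obtain ⟨r1, hr1⟩ := h1
  obtain ⟨r2, hr2⟩ := h2
  have : w1.take 2 = s.take 2 := by
    rw [← hr1, List.take_append_of_le_length hl1]
  have h2' : w2.take 2 = s.take 2 := by
    rw [← hr2, List.take_append_of_le_length hl2]
  rw [this, h2']

theorem filter_of_findEnt_some : ∀ {es : List (Int × List Char)} {s : List Char}
    {e : Int × List Char},
    List.Pairwise (fun a b => a.2.take 2 ≠ b.2.take 2) es → (∀ x ∈ es, 3 ≤ x.2.length) →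
    findEnt es s = some e → es.filter (fun x => x.2.isPrefixOf s) = [e] := by
  intro es
  induction es with
  | nil => intro s e _ _ h; simp [findEnt] at h
  | cons e0 es' ih =>
    intro s e hpw hlen h
    have hl0 : 3 ≤ e0.2.length := hlen e0 (by simp)
    by_cases hp : e0.2.isPrefixOf s
    · have he0 : e = e0 := by
        unfold findEnt at h
        rw [List.find?_cons_of_pos] at h
        · exact (Option.some.injEq _ _ ▸ h).symm ▸ rfl
        · simp [hp]; omega
      subst he0
      rw [List.filter_cons_of_pos (by simp [hp])]
      have : es'.filter (fun x => x.2.isPrefixOf s) = [] := by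
        rw [List.filter_eq_nil_iff]
        intro x hx hxp
        have hxl : 3 ≤ x.2.length := hlen x (by simp [hx])
        have : e.2.take 2 = x.2.take 2 :=
          both_prefix_take2 (List.isPrefixOf_iff_prefix.1 hp)
            (List.isPrefixOf_iff_prefix.1 hxp) (by omega) (by omega)
        exact (List.pairwise_cons.1 hpw).1 x hx this
      rw [this]
    · have h' : findEnt es' s = some e := by
        unfold findEnt at h ⊢
        rwa [List.find?_cons_of_neg (by simp [hp])] at h
      rw [List.filter_cons_of_neg (by simp [hp])]
      exact ih (List.pairwise_cons.1 hpw).2 (fun x hx => hlen x (by simp [hx])) h'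

theorem hits_of_some {es : List (Int × List Char)} {s : List Char} {e : Int × List Char}
    (hG : GoodList es) (h : findEnt es s = some e) : hitsG es s = [e.1] := by
  rw [hitsG_filter, filter_of_findEnt_some hG.2.2 (fun x hx => (hG.1 x hx).1) h]
  rfl

theorem hits_of_none {es : List (Int × List Char)} {s : List Char}
    (hG : GoodList es) (h : findEnt es s = none) : hitsG es s = [] := by
  rw [hitsG_filter]
  have : es.filter (fun x => x.2.isPrefixOf s) = [] := by
    rw [List.filter_eq_nil_iff]
    intro x hx hxp
    unfold findEnt at h
    rw [List.find?_eq_none] at h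
    have := h x hx
    simp [hxp] at this
    have hxl := (hG.1 x hx).1
    omega
  rw [this]
  rfl

theorem skip_scanG {es : List (Int × List Char)} (hG : GoodList es) :
    ∀ u z, (∀ c ∈ u, PySem.Chars.isdigit c = false) →
      (∀ p < u.length, findEnt es (u.drop p ++ z) = none) →
      scanG es (u ++ z) = scanG es z := by
  intro u
  induction u with
  | nil => intro z _ _; simp
  | cons a u' ih =>
    intro z hdf hc
    have h0 : findEnt es (a :: (u' ++ z)) = none := by
      have := hc 0 (by simp)
      simpa using this
    have ha : PySem.Chars.isdigit a = false := hdf a (by simp)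
    simp only [List.cons_append, scanG]
    rw [ha, hits_of_none hG h0, ih z (fun c hc' => hdf c (by simp [hc']))
      (fun p hp => by
        have := hc (p+1) (by simp; omega)
        simpa using this)]
    simp

theorem digits_main {es : List (Int × List Char)} (hG : GoodList es) :
    ∀ s, ((simRep es s).filter (fun c => PySem.Chars.isdigit c)).map (fun c => (c.toNat : Int) - 48)
      = scanG es s := by
  have main : ∀ (L : ℕ) (s : List Char), s.length = L →
      ((simRep es s).filter (fun c => PySem.Chars.isdigit c)).map (fun c => (c.toNat : Int) - 48)
        = scanG es s := by
    intro L
    induction L using Nat.strong_induction_on with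
    | _ L IH =>
      intro s hL
      cases hf : findEnt es s with
      | some e =>
        obtain ⟨hmem, hlen, hpre⟩ := findEnt_some hf
        have hGe := hG.1 e hmem
        have hL3 : 3 ≤ e.2.length := hGe.1
        obtain ⟨r, hr⟩ := hpre
        obtain ⟨x, xs, hw⟩ : ∃ x xs, e.2 = x :: xs := by
          cases hwc : e.2 with
          | nil => rw [hwc] at hL3; simp at hL3
          | cons a t => exact ⟨a, t, rfl⟩
        have hxnd : PySem.Chars.isdigit x = false :=
          wordChar_not_digit hG hmem (by rw [hw]; simp)
        have hdg : PySem.Chars.isdigit (entDigit e) = true := hGe.2.2.1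
        rw [simRep_some hf]
        have hheadx : e.2.headD ' ' = x := by rw [hw]; rfl
        rw [hheadx]
        simp only [List.filter_cons, hxnd, hdg, if_true, Bool.false_eq_true, if_false,
          List.map_cons]
        have hdrop : s.drop e.2.length = r := by rw [← hr]; exact List.drop_left
        have hlt : (e.2.getLastD ' ' :: s.drop e.2.length).length < L := by
          have := List.IsPrefix.length_le ⟨r, hr⟩
          simp only [List.length_cons, List.length_drop]
          omega
        rw [IH _ hlt _ rfl]
        -- right-hand side
        have hxs_ne : xs ≠ [] := by
          intro hq
          rw [hw, hq] at hL3
          simp at hL3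
        obtain ⟨v, lc, hv⟩ : ∃ v lc, xs = v ++ [lc] :=
          ⟨xs.dropLast, xs.getLast hxs_ne, (List.dropLast_append_getLast hxs_ne).symm⟩
        have hlc : e.2.getLastD ' ' = lc := by
          rw [hw, hv]
          have hgl : (x :: (v ++ [lc])).getLast? = some lc := by
            rw [← List.cons_append]
            exact List.getLast?_concat
          rw [List.getLastD_eq_getLast?, hgl]
          rfl
        have hs : s = x :: (v ++ (lc :: r)) := by rw [← hr, hw, hv]; simp
        conv_rhs => rw [hs, scanG, hxnd]
        simp only [Bool.false_eq_true, if_false]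
        have hfs : findEnt es (x :: (v ++ (lc :: r))) = some e := by rw [← hs]; exact hf
        rw [hits_of_some hG hfs]
        have hskip : scanG es (v ++ (lc :: r)) = scanG es (lc :: r) := by
          refine skip_scanG hG v (lc :: r) ?_ ?_
          · intro c hc
            exact wordChar_not_digit hG hmem (by rw [hw, hv]; simp [hc])
          · intro p hp
            have hdropeq : v.drop p ++ (lc :: r) = e.2.drop (p+1) ++ r := by
              rw [hw, hv]
              simp only [List.drop_succ_cons]
              rw [List.drop_append_of_le_length (by omega)]
              simp
            rw [hdropeq]
            refine findEnt_drop_none hG (fun y hy => hy) hmem (p+1) (by omega) ?_ r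
            rw [hw, hv]
            simp only [List.length_cons, List.length_append]
            omega
        rw [hskip, hdrop, hlc]
        have hval : ((entDigit e).toNat : Int) - 48 = e.1 := hGe.2.2.2.2
        rw [hval]
        rfl
      | none =>
        cases s with
        | nil => rw [simRep_none_nil hf]; rfl
        | cons c t =>
          rw [simRep_none_cons hf]
          rw [scanG]
          by_cases hd : PySem.Chars.isdigit c = true
          · simp only [List.filter_cons, hd, if_true, List.map_cons]
            rw [IH t.length (by rw [List.length_cons] at hL; omega) t rfl]
            rfl
          · simp only [Bool.not_eq_true] at hd
            simp only [List.filter_cons, hd, Bool.false_eq_true, if_false]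
            rw [IH t.length (by rw [List.length_cons] at hL; omega) t rfl,
              hits_of_none hG hf]
            rfl
  exact fun s => main s.length s rfl

theorem scanG_append_ne {es : List (Int × List Char)} (u z : List Char)
    (h : scanG es z ≠ []) : scanG es (u ++ z) ≠ [] := by
  induction u with
  | nil => simpa using h
  | cons a u' ih =>
    simp only [List.cons_append, scanG]
    intro hq
    rw [List.append_eq_nil_iff] at hq
    exact ih hq.2

theorem scanG_match_ne {es : List (Int × List Char)} (hG : GoodList es)
    {e : Int × List Char} (hmem : e ∈ es) (r : List Char) : scanG es (e.2 ++ r) ≠ [] := by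
  have hL3 : 3 ≤ e.2.length := (hG.1 e hmem).1
  obtain ⟨x, xs, hw⟩ : ∃ x xs, e.2 = x :: xs := by
    cases hwc : e.2 with
    | nil => rw [hwc] at hL3; simp at hL3
    | cons a t => exact ⟨a, t, rfl⟩
  rw [hw, List.cons_append, scanG]
  by_cases hd : PySem.Chars.isdigit x = true
  · simp [hd]
  · simp only [Bool.not_eq_true] at hd
    rw [hd]
    simp only [Bool.false_eq_true, if_false]
    have hex : ∃ y ∈ es, (decide (2 ≤ y.2.length) && y.2.isPrefixOf (x :: (xs ++ r))) = true := by
      refine ⟨e, hmem, ?_⟩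
      have : e.2 <+: (x :: (xs ++ r)) := by
        rw [hw]
        exact ⟨r, by simp⟩
      simp [List.isPrefixOf_iff_prefix.2 this]
      omega
    have : (findEnt es (x :: (xs ++ r))).isSome := by
      unfold findEnt
      rw [List.find?_isSome]
      exact hex
    cases hfind : findEnt es (x :: (xs ++ r)) with
    | none => rw [hfind] at this; simp at this
    | some e2 =>
      rw [hits_of_some hG hfind]
      simp

theorem scanLine_ne_of_pre {line : String}
    (h : (line.toList.any PySem.Chars.isdigit ||
      digitWords.any (fun w => PySem.Chars.isIn w.toList line.toList)) = true) :
    scanLine line.toList ≠ [] := by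
  rw [scanLine_eq]
  rw [Bool.or_eq_true] at h
  rcases h with h | h
  · rw [List.any_eq_true] at h
    obtain ⟨c, hc, hcd⟩ := h
    obtain ⟨l1, l2, hsplit⟩ := List.append_of_mem hc
    rw [hsplit]
    refine scanG_append_ne l1 (c :: l2) ?_
    rw [scanG, hcd]
    simp
  · rw [List.any_eq_true] at h
    obtain ⟨w, hwmem, hwin⟩ := h
    rw [PySem.Chars.isIn_iff_infix] at hwin
    obtain ⟨l1, l2, hsplit⟩ := hwin
    obtain ⟨k, hk, hkw⟩ := List.mem_iff_getElem.1 hwmem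
    have hment : ((k : Int), w.toList) ∈ ents := by
      rw [ents, PySem.List.mem_enumerate_iff]
      refine ⟨k, by simpa using hk, ?_⟩
      simp [hkw]
    rw [← hsplit, List.append_assoc]
    refine scanG_append_ne l1 (w.toList ++ l2) ?_
    exact scanG_match_ne good_ents hment l2

theorem digit_char_cases (a : Char) (h : PySem.Chars.isdigit a = true) :
    a ∈ ['0','1','2','3','4','5','6','7','8','9'] := by
  simp only [PySem.Chars.isdigit, Bool.and_eq_true, decide_eq_true_eq] at h
  obtain ⟨h1, h2⟩ := h
  have hv1 : 48 ≤ a.toNat := by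
    simpa [Char.le_def, UInt32.le_iff_toNat_le] using h1
  have hv2 : a.toNat ≤ 57 := by
    simpa [Char.le_def, UInt32.le_iff_toNat_le] using h2
  have ha : Char.ofNat a.toNat = a := Char.ofNat_toNat a
  rw [← ha]
  interval_cases hn : a.toNat <;> decide

theorem ofChars?_digits (a b : Char) (ha : PySem.Chars.isdigit a = true)
    (hb : PySem.Chars.isdigit b = true) :
    PySem.Int.ofChars? [a, b] = some (10 * ((a.toNat : Int) - 48) + ((b.toNat : Int) - 48)) := by
  have h1 := digit_char_cases a ha
  have h2 := digit_char_cases b hb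
  fin_cases h1 <;> fin_cases h2 <;> decide

theorem foldl_rep_bridge : ∀ (ps : List (String × String)) (es : List (Int × List Char)),
    ps.map (fun kv => (kv.1.toList, kv.2.toList)) = es.map (fun e => (e.2, entPat e)) →
    (∀ e ∈ es, 3 ≤ e.2.length) →
    ∀ l : String, (ps.foldl (fun acc kv => PySem.Str.replace acc kv.1 kv.2) l).toList
      = es.foldl (fun cs e => rep e.2 (entPat e) cs) l.toList := by
  intro ps
  induction ps with
  | nil =>
    intro es h _ l
    cases es with
    | nil => simp
    | cons e es' => simp at h
  | cons kv ps' ih =>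
    intro es h hlen l
    cases es with
    | nil => simp at h
    | cons e es' =>
      simp only [List.map_cons, List.cons.injEq, Prod.mk.injEq] at h
      obtain ⟨⟨h1, h2⟩, h3⟩ := h
      simp only [List.foldl_cons]
      rw [ih es' h3 (fun x hx => hlen x (List.mem_cons_of_mem _ hx))]
      congr 1
      rw [PySem.Str.replace, String.toList_ofList,
        replace_eq_rep _ _ _ (by
          intro hq
          have h3l := hlen e (by simp)
          rw [h1] at hq
          rw [hq] at h3l
          simp at h3l), h1, h2]

theorem line_bridge (line : String) :
    (translation.foldl (fun l kv => PySem.Str.replace l kv.1 kv.2) line).toList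
      = ents.foldl (fun l e => rep e.2 (entPat e) l) line.toList := by
  exact foldl_rep_bridge translation ents (by decide)
    (fun e he => (good_ents.1 e he).1) line

theorem line_values_eq (line : String)
    (h : (line.toList.any PySem.Chars.isdigit ||
      digitWords.any (fun w => PySem.Chars.isIn w.toList line.toList)) = true) :
    (match PySem.List.pyGet?
        ((translation.foldl (fun l kv => PySem.Str.replace l kv.1 kv.2) line).toList.filter
          (fun j => PySem.Chars.isdigit j)) 0,
      PySem.List.pyGet?
        ((translation.foldl (fun l kv => PySem.Str.replace l kv.1 kv.2) line).toList.filter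
          (fun j => PySem.Chars.isdigit j)) (-1) with
     | some a, some b => (PySem.Int.ofChars? [a, b]).getD 0
     | _, _ => (0 : Int))
    = (match PySem.List.pyGet? (scanLine line.toList) 0,
        PySem.List.pyGet? (scanLine line.toList) (-1) with
       | some a, some b => 10 * a + b
       | none, _ => (0 : Int)
       | some _, none => (0 : Int)) := by
  have hrepl : (translation.foldl (fun l kv => PySem.Str.replace l kv.1 kv.2) line).toList
      = simRep ents line.toList := by
    rw [line_bridge, chain_simRep ents good_ents]
  rw [hrepl]
  set cs := (simRep ents line.toList).filter (fun j => PySem.Chars.isdigit j) with hcs_def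
  have hmap : cs.map (fun c => (c.toNat : Int) - 48) = scanLine line.toList := by
    rw [scanLine_eq, hcs_def]
    exact digits_main good_ents line.toList
  have hne : scanLine line.toList ≠ [] := scanLine_ne_of_pre h
  have hcs_ne : cs ≠ [] := by
    intro hq
    rw [hq, List.map_nil] at hmap
    exact hne hmap.symm
  obtain ⟨a0, tl, hcs⟩ : ∃ a0 tl, cs = a0 :: tl := by
    cases hcc : cs with
    | nil => exact absurd hcc hcs_ne
    | cons y ys => exact ⟨y, ys, rfl⟩
  have hget0 : PySem.List.pyGet? cs 0 = some a0 := by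
    rw [PySem.List.pyGet?_zero, hcs]
    rfl
  have hlast : cs.getLast? = some (cs.getLast hcs_ne) := List.getLast?_eq_some_getLast hcs_ne
  have hgetm1 : PySem.List.pyGet? cs (-1) = some (cs.getLast hcs_ne) := by
    rw [PySem.List.pyGet?_neg_one, hlast]
  have hB0 : PySem.List.pyGet? (scanLine line.toList) 0
      = some ((a0.toNat : Int) - 48) := by
    rw [← hmap, PySem.List.pyGet?_zero, hcs]
    rfl
  have hBlast : PySem.List.pyGet? (scanLine line.toList) (-1)
      = some (((cs.getLast hcs_ne).toNat : Int) - 48) := by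
    rw [← hmap, PySem.List.pyGet?_neg_one, List.getLast?_map, hlast]
    rfl
  rw [hget0, hgetm1, hB0, hBlast]
  have ha0 : PySem.Chars.isdigit a0 = true := by
    have hmem : a0 ∈ cs := by rw [hcs]; simp
    exact (List.mem_filter.1 hmem).2
  have hb0 : PySem.Chars.isdigit (cs.getLast hcs_ne) = true := by
    have hmem : cs.getLast hcs_ne ∈ cs := List.getLast_mem hcs_ne
    exact (List.mem_filter.1 hmem).2
  show (PySem.Int.ofChars? [a0, cs.getLast hcs_ne]).getD 0
    = 10 * ((a0.toNat : Int) - 48) + (((cs.getLast hcs_ne).toNat : Int) - 48)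
  rw [ofChars?_digits a0 (cs.getLast hcs_ne) ha0 hb0]
  rfl

-- ===== VERDICT (by name: the statement is the Claim_ definition above) =====
set_option maxRecDepth 10000 in
set_option maxHeartbeats 2000000 in
theorem part_two_spec : Claim_equal_part_two := by
  unfold Claim_equal_part_two
  intro data hdom hpre
  unfold Spec_part_two part_two part_two_alt
  unfold Pre_part_two at hpre
  rw [List.all_eq_true] at hpre
  refine PySem.List.foldl_congr_mem data _ _ 0 ?_
  intro acc line hline
  have hcond := hpre line hline
  exact congrArg (fun z => acc + z) (line_values_eq line hcond)
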